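-- pv_equiv track=rewrite | github.com/nekkk/mil-manager-catalog | tools/generate-index.py | choose_artwork_urls
-- ===== SOURCE A (Python) =====
-- def choose_artwork_urls(entry: dict) -> tuple[str, str]:
--     thumbnail = str(entry.get("thumbnailUrl") or "").strip()
--     icon = str(entry.get("iconUrl") or "").strip()
--     cover = str(entry.get("coverUrl") or "").strip()
--
--     primary = thumbnail or icon or cover
--     fallback = ""
--     for candidate in (icon, cover):
--         if candidate and candidate != primary:
--             fallback = candidate
--             break
--
--     return primary, fallback
-- ===== SOURCE B (Python) =====
-- def choose_artwork_urls(entry: dict) -> tuple[str, str]: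
--     vals = [str(entry.get(k) or "").strip()
--             for k in ("thumbnailUrl", "iconUrl", "coverUrl")]
--     uniq = []
--     for v in vals:
--         if v and v not in uniq:
--             uniq.append(v)
--     primary = uniq[0] if uniq else ""
--     fallback = uniq[1] if len(uniq) > 1 else ""
--     return primary, fallback
-- ===== Notes on version B (the rewrite author's own statement) =====
-- stated objective: simpler
-- what changed: Replaces A's or-chain for primary plus a separate fallback loop with one order-preserving dedup pass over the three stripped values, then reads primary and fallback as the first two elements.
import Mathlib
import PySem

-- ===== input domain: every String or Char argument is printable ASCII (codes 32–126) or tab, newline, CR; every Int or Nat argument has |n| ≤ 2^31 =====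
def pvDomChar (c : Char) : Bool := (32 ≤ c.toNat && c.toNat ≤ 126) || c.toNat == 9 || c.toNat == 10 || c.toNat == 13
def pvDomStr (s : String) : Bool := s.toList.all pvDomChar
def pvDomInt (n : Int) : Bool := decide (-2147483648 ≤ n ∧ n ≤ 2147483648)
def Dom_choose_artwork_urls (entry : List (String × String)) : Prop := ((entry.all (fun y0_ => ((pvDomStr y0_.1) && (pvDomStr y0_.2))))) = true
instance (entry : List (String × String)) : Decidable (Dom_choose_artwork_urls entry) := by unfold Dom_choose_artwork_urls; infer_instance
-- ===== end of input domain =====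

-- B replaces A's or-chain + separate fallback loop with one ordered-dedup pass (simpler decomposition).

-- shared field read: str(entry.get(k) or "").strip()  (identical first line in both Pythons)
def pvStripGet (entry : List (String × String)) (k : String) : String :=
  PySem.Str.strip ((PySem.Dict.ofList entry).getD k "")

-- ===== PORT A =====
-- the 'for candidate in (icon, cover): … break' loop
def pvFallbackLoop (primary : String) : List String → String
  | [] => ""
  | c :: rest => if c ≠ "" ∧ c ≠ primary then c else pvFallbackLoop primary rest

def choose_artwork_urls (entry : List (String × String)) : String × String :=
  let thumbnail := pvStripGet entry "thumbnailUrl"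
  let icon := pvStripGet entry "iconUrl"
  let cover := pvStripGet entry "coverUrl"
  let primary := if thumbnail ≠ "" then thumbnail else if icon ≠ "" then icon else cover
  (primary, pvFallbackLoop primary [icon, cover])

-- ===== PORT B =====
def choose_artwork_urls_alt (entry : List (String × String)) : String × String :=
  let vals := ["thumbnailUrl", "iconUrl", "coverUrl"].map (pvStripGet entry)
  let uniq := vals.foldl (fun acc v => if v ≠ "" ∧ v ∉ acc then acc ++ [v] else acc) []
  ((uniq.headD ""), (uniq[1]?).getD "")

-- ===== PRECONDITION & SPEC =====
def Spec_choose_artwork_urls (entry : List (String × String)) (out : String × String) : Prop := out = choose_artwork_urls_alt entry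
instance (entry : List (String × String)) (out : String × String) : Decidable (Spec_choose_artwork_urls entry out) := by unfold Spec_choose_artwork_urls; infer_instance

-- ===== CLAIM (what is proved, stated in full; the proofs are below) =====
def Claim_equal_choose_artwork_urls : Prop := ∀ (entry : List (String × String)), Dom_choose_artwork_urls entry → Spec_choose_artwork_urls entry (choose_artwork_urls entry)

-- ===== LEMMAS AND PROOFS =====

-- core equivalence over the three stripped strings
theorem pv_core_eq (t i c : String) :
    ((if t ≠ "" then t else if i ≠ "" then i else c),
      pvFallbackLoop (if t ≠ "" then t else if i ≠ "" then i else c) [i, c]) =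
    (let uniq := [t, i, c].foldl (fun acc v => if v ≠ "" ∧ v ∉ acc then acc ++ [v] else acc) [];
      ((uniq.headD ""), (uniq[1]?).getD "")) := by
  by_cases ht : t = "" <;> by_cases hi : i = "" <;> by_cases hc : c = "" <;>
    by_cases hit : i = t <;> by_cases hct : c = t <;> by_cases hci : c = i <;>
    simp_all [pvFallbackLoop, List.foldl]

-- ===== VERDICT (by name: the statement is the Claim_ definition above) =====
theorem choose_artwork_urls_spec : Claim_equal_choose_artwork_urls := by
  intro entry _
  unfold Spec_choose_artwork_urls choose_artwork_urls choose_artwork_urls_alt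
  simpa using pv_core_eq (pvStripGet entry "thumbnailUrl") (pvStripGet entry "iconUrl")
    (pvStripGet entry "coverUrl")
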